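-- pv_equiv track=rewrite | github.com/ejdigby/GCSE-Encryption-Coursework | source/program.py | SecureEncryptText
-- ===== SOURCE A (Python) =====
-- def SecureEncryptText(text, offset):
--     finaltext = ""
--     text = text.strip()
--     text = text.replace(" ", "")
--     chct = 0
--     for c in text:
--         chct = chct + 1
--         x = c
--         x = ord(c) + offset
--         if x > 126:
--            x -= 94
--         x = chr(x)
--         finaltext  += x
--         if chct % 5 == 0:
--             finaltext += " "
--     return finaltext
-- ===== SOURCE B (Python) =====
-- def _shift(c, offset):
--     x = ord(c) + offset
--     if x > 126:
--         x -= 94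
--     return chr(x)
--
--
-- def SecureEncryptText(text, offset):
--     shifted = "".join(_shift(c, offset) for c in text.strip().replace(" ", ""))
--     full = len(shifted) // 5
--     return "".join(shifted[5 * i:5 * i + 5] + " " for i in range(full)) + shifted[5 * full:]
-- ===== Notes on version B (the rewrite author's own statement) =====
-- stated objective: alternative
-- what changed: A interleaves shifting and grouping in one loop with a character counter and mod-5 test; B first maps every character through the shift in one pass and then regroups the shifted string into five-character blocks in a second pass (transform-then-chunk decomposition).
import Mathlib
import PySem

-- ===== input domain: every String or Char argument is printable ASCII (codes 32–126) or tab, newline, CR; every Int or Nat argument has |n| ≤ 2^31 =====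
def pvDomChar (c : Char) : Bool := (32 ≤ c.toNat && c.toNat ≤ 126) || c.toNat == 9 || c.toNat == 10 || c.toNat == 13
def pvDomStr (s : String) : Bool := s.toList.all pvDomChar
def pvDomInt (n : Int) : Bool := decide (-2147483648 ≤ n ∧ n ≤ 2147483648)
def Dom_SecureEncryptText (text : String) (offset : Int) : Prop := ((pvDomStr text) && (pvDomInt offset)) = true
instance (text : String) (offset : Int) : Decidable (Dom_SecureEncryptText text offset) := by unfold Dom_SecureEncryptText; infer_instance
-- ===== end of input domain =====

-- B separates the Caesar shift (one map pass) from the grouping into fives (a second pass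
-- joining the five-character blocks), instead of A's single loop with a character counter.

-- ===== PORT A =====
-- one iteration of A's for-loop; state = (chct, finaltext as a char list).
-- ord c = c.toNat and chr x = Char.ofNat x.toNat, exact wherever the code is a Unicode
-- scalar value; on the surrogate band 0xD800–0xDFFF (no Lean Char exists for Python's
-- lone-surrogate str) both ports apply the same Char.ofNat alike, so the equivalence
-- claim is unaffected.
def stepA (offset : Int) (st : Nat × List Char) (c : Char) : Nat × List Char :=
  let chct := st.1 + 1
  let x : Int := (c.toNat : Int) + offset
  let x := if x > 126 then x - 94 else x
  let ch := Char.ofNat x.toNat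
  let ft := st.2 ++ [ch]
  (chct, if chct % 5 == 0 then ft ++ [' '] else ft)

def SecureEncryptText (text : String) (offset : Int) : String :=
  let t := PySem.Str.replace (PySem.Str.strip text) " " ""
  String.ofList ((t.toList.foldl (stepA offset) (0, [])).2)

-- ===== PORT B =====
-- Source B's _shift: same exactness note as for port A (chr via Char.ofNat).
def shiftChar (offset : Int) (c : Char) : Char :=
  let x : Int := (c.toNat : Int) + offset
  Char.ofNat (if x > 126 then x - 94 else x).toNat

def SecureEncryptText_alt (text : String) (offset : Int) : String :=
  let shifted := (PySem.Str.replace (PySem.Str.strip text) " " "").toList.map (shiftChar offset)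
  let full := shifted.length / 5
  -- shifted[5*i : 5*i+5] / shifted[5*full:] with nonnegative in-order bounds: drop-then-take is exact
  String.ofList ((List.range full).foldl
      (fun acc i => acc ++ ((shifted.drop (5 * i)).take 5 ++ [' '])) [] ++ shifted.drop (5 * full))

-- ===== PRECONDITION & SPEC =====
-- Pre_ excludes exactly the inputs on which A raises: Python's chr raises ValueError when
-- the shifted code ord(c)+offset of some remaining (stripped, non-space) character is < 0,
-- or exceeds 1114205 (so that even after the -94 wrap it is > 0x10FFFF).
def Pre_SecureEncryptText (text : String) (offset : Int) : Prop :=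
  ((PySem.Str.replace (PySem.Str.strip text) " " "").toList.all
    (fun c => decide (0 ≤ (c.toNat : Int) + offset) &&
              decide ((c.toNat : Int) + offset ≤ 1114205))) = true
instance (text : String) (offset : Int) : Decidable (Pre_SecureEncryptText text offset) := by
  unfold Pre_SecureEncryptText; infer_instance

def pvWitness_SecureEncryptText : String × Int := ("hello world", 3)

def Spec_SecureEncryptText (text : String) (offset : Int) (out : String) : Prop := out = SecureEncryptText_alt text offset
instance (text : String) (offset : Int) (out : String) : Decidable (Spec_SecureEncryptText text offset out) := by unfold Spec_SecureEncryptText; infer_instance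

-- ===== CLAIM (what is proved, stated in full; the proofs are below) =====
def Claim_equal_SecureEncryptText : Prop := ∀ (text : String) (offset : Int), Dom_SecureEncryptText text offset → Pre_SecureEncryptText text offset → Spec_SecureEncryptText text offset (SecureEncryptText text offset)

-- ===== LEMMAS AND PROOFS =====

-- proof-side middle form of the grouping: a space after every complete block of five, recursively.
def group5 (s : List Char) : List Char :=
  if s.length < 5 then s
  else s.take 5 ++ ' ' :: group5 (s.drop 5)
termination_by s.length
decreasing_by simp; omega

-- a run of A's loop during which the counter never hits a multiple of 5: no space is emitted.
theorem foldl_stepA_nospace (off : Int) (cs : List Char) : ∀ (n : Nat) (acc : List Char),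
    (∀ i < cs.length, (n + i + 1) % 5 ≠ 0) →
    List.foldl (stepA off) (n, acc) cs = (n + cs.length, acc ++ cs.map (shiftChar off)) := by
  induction cs with
  | nil => intro n acc _; simp
  | cons c cs ih =>
    intro n acc h
    have h0 : (n + 1) % 5 ≠ 0 := by
      have := h 0 (by simp); omega
    simp only [List.foldl, List.map]
    have hstep : stepA off (n, acc) c = (n + 1, acc ++ [shiftChar off c]) := by
      simp [stepA, shiftChar, show ((n + 1) % 5 == 0) = false from by simpa using h0]
    rw [hstep, ih (n + 1) (acc ++ [shiftChar off c])
      (by intro i hi; have := h (i + 1) (by simpa using Nat.succ_lt_succ hi); omega)]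
    simp; omega

-- A's loop started at a counter that is a multiple of 5 produces exactly group5 of the
-- shifted characters.
theorem foldl_stepA_eq_group5 (off : Int) : ∀ (cs : List Char) (k : Nat) (acc : List Char),
    (List.foldl (stepA off) (5 * k, acc) cs).2 = acc ++ group5 (cs.map (shiftChar off))
  | a :: b :: c :: d :: e :: rest, k, acc => by
    -- first four characters: no space
    have h4 : List.foldl (stepA off) (5 * k, acc) [a, b, c, d]
        = (5 * k + 4, acc ++ [a, b, c, d].map (shiftChar off)) := by
      apply foldl_stepA_nospace
      intro i hi; simp at hi; omega
    have hsplit : (a :: b :: c :: d :: e :: rest) = [a, b, c, d] ++ (e :: rest) := by simp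
    rw [hsplit, List.foldl_append, h4]
    -- fifth character: counter hits 5*(k+1), a space is emitted
    have h5 : (5 * k + 4 + 1) % 5 = 0 := by omega
    have hstep : stepA off (5 * k + 4, acc ++ [a, b, c, d].map (shiftChar off)) e
        = (5 * (k + 1), (acc ++ [a, b, c, d].map (shiftChar off)) ++ [shiftChar off e] ++ [' ']) := by
      simp [stepA, shiftChar, h5]; omega
    simp only [List.foldl, hstep]
    rw [foldl_stepA_eq_group5 off rest (k + 1)
      ((acc ++ [a, b, c, d].map (shiftChar off)) ++ [shiftChar off e] ++ [' '])]
    -- fold group5 once on the ≥ 5-long shifted list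
    conv_rhs => rw [group5]
    simp
  | [], k, acc => by simp [group5]
  | [a], k, acc => by
    rw [foldl_stepA_nospace off [a] (5 * k) acc (by intro i hi; simp at hi; omega)]
    simp [group5]
  | [a, b], k, acc => by
    rw [foldl_stepA_nospace off [a, b] (5 * k) acc (by intro i hi; simp at hi; omega)]
    simp [group5]
  | [a, b, c], k, acc => by
    rw [foldl_stepA_nospace off [a, b, c] (5 * k) acc (by intro i hi; simp at hi; omega)]
    simp [group5]
  | [a, b, c, d], k, acc => by
    rw [foldl_stepA_nospace off [a, b, c, d] (5 * k) acc (by intro i hi; simp at hi; omega)]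
    simp [group5]
termination_by cs => cs.length

-- group5 coincides with B's block-join form of the grouping.
theorem group5_eq_chunks (s : List Char) :
    group5 s = (List.range (s.length / 5)).flatMap (fun i => (s.drop (5 * i)).take 5 ++ [' '])
      ++ s.drop (5 * (s.length / 5)) := by
  induction s using group5.induct with
  | case1 s hlen =>
    rw [group5, if_pos hlen]
    have h0 : s.length / 5 = 0 := by omega
    simp [h0]
  | case2 s hlen hrec =>
    rw [group5, if_neg hlen]
    have hlen' : (s.drop 5).length = s.length - 5 := by simp
    have hdiv : s.length / 5 = (s.length - 5) / 5 + 1 := by omega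
    rw [hdiv, List.range_succ_eq_map, List.flatMap_cons, List.flatMap_map]
    have hfun : (fun a : Nat => List.take 5 (List.drop (5 * a.succ) s) ++ ([' '] : List Char))
        = (fun i => List.take 5 (List.drop (5 * i) (List.drop 5 s)) ++ [' ']) := by
      funext i
      rw [List.drop_drop]
      have h5 : 5 * i.succ = 5 + 5 * i := by omega
      rw [h5]
    have hdropN : List.drop (5 * ((s.length - 5) / 5)) (List.drop 5 s)
        = List.drop (5 * ((s.length - 5) / 5 + 1)) s := by
      rw [List.drop_drop]; congr 1; omega
    rw [hfun, ← hdropN, ← hlen']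
    simp only [List.append_assoc]
    rw [← hrec]
    simp

-- ===== VERDICT (by name: the statement is the Claim_ definition above) =====
theorem SecureEncryptText_spec : Claim_equal_SecureEncryptText := by
  intro text offset _dom _pre
  unfold Spec_SecureEncryptText SecureEncryptText SecureEncryptText_alt
  have h := foldl_stepA_eq_group5 offset
    (PySem.Str.replace (PySem.Str.strip text) " " "").toList 0 []
  simp only [Nat.mul_zero, List.nil_append] at h
  simp only [pysem] at h ⊢
  rw [h, group5_eq_chunks]
  simp
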